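-- pv_equiv track=rewrite | github.com/Halkov12/HillelHW | hw19/task1.1.py | divide_and_multiply
-- ===== SOURCE A (Python) =====
-- def divide_and_multiply(ns):
--     MOD = 10**9 + 7
--
--     total_twos = 0
--     rest_nums = []
--
--     for num in ns:
--         count = 0
--         while num % 2 == 0:
--             num //= 2
--             count += 1
--         total_twos += count
--         rest_nums.append(num)
--
--     max_val = max(rest_nums)
--     rest_nums.remove(max_val)
--
--     max_val *= pow(2, total_twos, MOD)
--     max_val %= MOD
--
--     total = (max_val + sum(rest_nums)) % MOD
--     return total
-- ===== SOURCE B (Python) =====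
-- MOD = 10 ** 9 + 7
--
--
-- def _strip(n, t):
--     """Recursively split n into (odd part, number of factors of 2)."""
--     q, r = divmod(n, 2)
--     if r == 0:
--         return _strip(q, t + 1)
--     return n, t
--
--
-- def divide_and_multiply(ns):
--     pairs = [_strip(n, 0) for n in ns]
--     twos = sum(t for _, t in pairs)
--     odds = sorted(o for o, _ in pairs)
--     *rest, m = odds
--     return (m * pow(2, twos, MOD) + sum(rest)) % MOD
-- ===== Notes on version B (the rewrite author's own statement) =====
-- stated objective: alternative
-- what changed: B replaces A's imperative loop (inner while halving, list.append) and the max/remove/sum passes by a recursive divmod helper, comprehensions over a pairs list, and a sort: the largest odd part is the last element of sorted(odds) and the rest is its prefix, combined as (last*2^t + sum(prefix)) mod 1e9+7.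
import Mathlib
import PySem

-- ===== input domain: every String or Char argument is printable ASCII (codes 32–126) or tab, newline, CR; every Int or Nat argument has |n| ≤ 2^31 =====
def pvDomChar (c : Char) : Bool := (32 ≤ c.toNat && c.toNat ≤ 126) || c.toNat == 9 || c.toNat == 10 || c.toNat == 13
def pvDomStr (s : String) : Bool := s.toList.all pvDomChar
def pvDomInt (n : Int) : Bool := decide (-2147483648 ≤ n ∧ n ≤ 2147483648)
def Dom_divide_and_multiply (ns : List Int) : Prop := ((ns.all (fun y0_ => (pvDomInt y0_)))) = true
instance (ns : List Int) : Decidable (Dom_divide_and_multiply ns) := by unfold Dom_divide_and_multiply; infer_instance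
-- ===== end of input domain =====

-- B replaces A's imperative while/append loop and max/remove passes by a recursive
-- divmod helper, comprehensions, and a sort (largest odd part = last of sorted list).

-- ===== PORT A =====
-- A's inner `while num % 2 == 0: num //= 2; count += 1` loop;
-- the `n ≠ 0` guard only makes the recursion total (Python diverges at 0; Pre_ excludes it)
def pvOdd (n : Int) : Int × Nat :=
  if h : n ≠ 0 ∧ PySem.Int.mod n 2 = 0 then
    let r := pvOdd (PySem.Int.floordiv n 2)
    (r.1, r.2 + 1)
  else (n, 0)
termination_by n.natAbs
decreasing_by
  rw [PySem.Int.floordiv_eq_ediv_of_pos (by omega)]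
  have h1 := h.1
  have h2 := h.2
  rw [PySem.Int.mod_eq_emod_of_pos (by omega)] at h2
  omega

def divide_and_multiply (ns : List Int) : Int :=
  let MOD : Int := 10 ^ 9 + 7
  let st := ns.foldl (fun (st : Nat × List Int) num =>
      let r := pvOdd num
      (st.1 + r.2, st.2 ++ [r.1])) (0, [])
  match PySem.List.max? st.2 (fun x => x) with
  | none => 0   -- max([]) raises ValueError; excluded by Pre_
  | some mv =>
    let rest := (PySem.List.remove? st.2 mv).getD st.2
    let mv2 := PySem.Int.mod (mv * PySem.Int.powMod 2 st.1 MOD) MOD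
    PySem.Int.mod (mv2 + rest.sum) MOD

-- ===== PORT B =====
-- Source B's `_strip(n, t)`: recursive divmod splitting n into (odd part, twos);
-- the `n ≠ 0` guard only makes the recursion total (Python hits RecursionError at 0; excluded by Pre_)
def pvStrip (n : Int) (t : Nat) : Int × Nat :=
  let q := PySem.Int.floordiv n 2
  let r := PySem.Int.mod n 2
  if h : n ≠ 0 ∧ r = 0 then pvStrip q (t + 1)
  else (n, t)
termination_by n.natAbs
decreasing_by
  rw [PySem.Int.floordiv_eq_ediv_of_pos (by omega)]
  have h1 := h.1
  have h2 := h.2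
  simp only [r] at h2
  rw [PySem.Int.mod_eq_emod_of_pos (by omega)] at h2
  omega

def divide_and_multiply_alt (ns : List Int) : Int :=
  let MOD : Int := 10 ^ 9 + 7
  let pairs := ns.map (fun n => pvStrip n 0)
  let twos := (pairs.map (fun p => p.2)).sum
  let odds := PySem.List.sorted (pairs.map (fun p => p.1)) (fun x => x)
  match odds.getLast? with
  | none => 0   -- `*rest, m = []` raises ValueError; excluded by Pre_
  | some m => PySem.Int.mod (m * PySem.Int.powMod 2 twos MOD + odds.dropLast.sum) MOD

-- ===== PRECONDITION & SPEC =====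
-- Pre_ excludes the empty list (A raises ValueError at max([])) and any list containing 0
-- (A's inner while loop never terminates on 0).
def Pre_divide_and_multiply (ns : List Int) : Prop := ns ≠ [] ∧ ¬ (0 ∈ ns)
instance (ns : List Int) : Decidable (Pre_divide_and_multiply ns) := by
  unfold Pre_divide_and_multiply; infer_instance
def pvWitness_divide_and_multiply : List Int := [6, 3]

def Spec_divide_and_multiply (ns : List Int) (out : Int) : Prop := out = divide_and_multiply_alt ns
instance (ns : List Int) (out : Int) : Decidable (Spec_divide_and_multiply ns out) := by unfold Spec_divide_and_multiply; infer_instance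

-- ===== CLAIM (what is proved, stated in full; the proofs are below) =====
def Claim_equal_divide_and_multiply : Prop := ∀ (ns : List Int), Dom_divide_and_multiply ns → Pre_divide_and_multiply ns → Spec_divide_and_multiply ns (divide_and_multiply ns)

-- ===== LEMMAS AND PROOFS =====

-- B's recursive strip computes the same pair as A's while loop, offset by the accumulator
theorem pvStrip_eq_pvOdd (n : Int) (t : Nat) :
    pvStrip n t = ((pvOdd n).1, t + (pvOdd n).2) := by
  rw [pvStrip, pvOdd]
  by_cases h : n ≠ 0 ∧ PySem.Int.mod n 2 = 0
  · rw [dif_pos h, dif_pos h, pvStrip_eq_pvOdd (PySem.Int.floordiv n 2) (t + 1)]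
    dsimp only
    exact congrArg₂ Prod.mk rfl (by omega)
  · rw [dif_neg h, dif_neg h]
    simp
termination_by n.natAbs
decreasing_by
  rw [PySem.Int.floordiv_eq_ediv_of_pos (by omega)]
  have h1 := h.1
  have h2 := h.2
  rw [PySem.Int.mod_eq_emod_of_pos (by omega)] at h2
  omega

-- A's fold builds the total twos count and the list of odd parts
theorem foldA_spec (ns : List Int) (t : Nat) (acc : List Int) :
    ns.foldl (fun (st : Nat × List Int) num =>
      let r := pvOdd num
      (st.1 + r.2, st.2 ++ [r.1])) (t, acc)
    = (t + (ns.map (fun n => (pvOdd n).2)).sum, acc ++ ns.map (fun n => (pvOdd n).1)) := by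
  induction ns generalizing t acc with
  | nil => simp
  | cons x xs ih => simp [ih, Nat.add_assoc]

theorem sum_erase_int (l : List Int) (a : Int) (h : a ∈ l) : (l.erase a).sum = l.sum - a := by
  have := List.sum_erase (l := l) (a := a) h
  omega

-- a Pairwise-(≤) list is bounded by its last element
theorem le_getLast_of_pairwise (l : List Int) (h : l.Pairwise (· ≤ ·)) :
    ∀ y ∈ l, ∀ (hne : l ≠ []), y ≤ l.getLast hne := by
  induction l with
  | nil => intro y hy; simp at hy
  | cons x t ih =>
    intro y hy hne
    cases t with
    | nil => simp at hy; simp [hy, List.getLast]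
    | cons a t' =>
      rw [List.getLast_cons (by simp)]
      rcases List.mem_cons.mp hy with rfl | hyt
      · exact (List.pairwise_cons.mp h).1 _ (List.getLast_mem _)
      · exact ih (List.pairwise_cons.mp h).2 y hyt (by simp)

-- hence the last element of a sorted list is ≥ every element of the original list
theorem getLast_sorted_ge (L : List Int) (m : Int)
    (hm : (PySem.List.sorted L (fun x => x)).getLast? = some m) :
    ∀ y ∈ L, y ≤ m := by
  intro y hy
  have hne : PySem.List.sorted L (fun x => x) ≠ [] := by
    intro h; rw [h] at hm; simp at hm
  have hlast : (PySem.List.sorted L (fun x => x)).getLast hne = m := by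
    have := List.getLast?_eq_some_getLast (l := PySem.List.sorted L (fun x => x)) hne
    rw [hm] at this; exact (Option.some.inj this).symm
  rw [← hlast]
  exact le_getLast_of_pairwise _ (PySem.List.sorted_pairwise ..) y
    ((PySem.List.mem_sorted ..).mpr hy) hne

-- ===== VERDICT (by name: the statement is the Claim_ definition above) =====
theorem divide_and_multiply_spec : Claim_equal_divide_and_multiply := by
  intro ns _ hpre
  rcases hpre with ⟨hne, -⟩
  unfold Spec_divide_and_multiply divide_and_multiply divide_and_multiply_alt
  simp only []
  obtain ⟨x, xs, rfl⟩ : ∃ x xs, ns = x :: xs := by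
    cases ns with
    | nil => exact absurd rfl hne
    | cons x xs => exact ⟨x, xs, rfl⟩
  rw [foldA_spec]
  simp only [pvStrip_eq_pvOdd, Nat.zero_add, List.map_map, Function.comp_def,
    List.map_cons, List.nil_append]
  set R := xs.map (fun n => (pvOdd n).1) with hR
  set r0 := (pvOdd x).1 with hr0
  set tws := ((pvOdd x).2 + (xs.map (fun n => (pvOdd n).2)).sum) with htws
  -- A side: the max and the erase
  have hmax : PySem.List.max? (r0 :: R) (fun x => x) = some (R.foldl max r0) :=
    PySem.List.max?_id_cons ..
  rw [hmax]
  dsimp only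
  set mv := R.foldl max r0 with hmv
  have hmem : mv ∈ r0 :: R := PySem.List.max?_mem (key := fun x => x) hmax
  rw [PySem.List.remove?_eq_some_erase _ _ hmem]
  simp only [Option.getD_some]
  -- B side: the sorted list, its last element and the prefix sum
  set S := PySem.List.sorted (r0 :: R) (fun x => x) with hS
  have hSne : S ≠ [] := by
    rw [hS]; intro h
    exact List.cons_ne_nil r0 R ((PySem.List.sorted_eq_nil_iff ..).mp h)
  obtain ⟨m, hm⟩ : ∃ m, S.getLast? = some m := ⟨S.getLast hSne, List.getLast?_eq_some_getLast hSne⟩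
  rw [hm]
  dsimp only
  -- m = mv : both are the maximum of r0 :: R
  have hmS : m ∈ r0 :: R := by
    have : m ∈ S := by
      have := List.getLast?_eq_some_getLast (l := S) hSne
      rw [hm] at this
      rw [Option.some.inj this]
      exact List.getLast_mem hSne
    exact (PySem.List.mem_sorted ..).mp (hS ▸ this)
  have hmv_le_m : mv ≤ m := getLast_sorted_ge (r0 :: R) m (hS ▸ hm) mv hmem
  have hm_le_mv : m ≤ mv := by
    have h1 := (PySem.List.le_foldl_max R r0).1
    have h2 := (PySem.List.le_foldl_max R r0).2
    rcases List.mem_cons.mp hmS with hc | hc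
    · rw [hc]; exact hmv ▸ h1
    · exact hmv ▸ h2 m hc
  have hmmv : m = mv := le_antisymm hm_le_mv hmv_le_m
  -- prefix sum of the sorted list = sum of the erased list
  have hSperm : S.Perm (r0 :: R) := hS ▸ PySem.List.sorted_perm ..
  have hSsum : S.sum = (r0 :: R).sum := hSperm.sum_eq
  have hsplit : S.dropLast ++ [m] = S := by
    have := List.dropLast_append_getLast (l := S) hSne
    have hlast : S.getLast hSne = m := by
      have h2 := List.getLast?_eq_some_getLast (l := S) hSne
      rw [hm] at h2; exact (Option.some.inj h2).symm
    rw [hlast] at this; exact this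
  have hdrop : S.dropLast.sum = (r0 :: R).sum - m := by
    have : S.dropLast.sum + m = S.sum := by
      rw [← hsplit]; simp
    omega
  rw [hdrop, sum_erase_int _ _ hmem, hmmv]
  -- final modular arithmetic
  have hK : (0:Int) < 10 ^ 9 + 7 := by norm_num
  simp only [PySem.Int.mod_eq_emod_of_pos hK]
  generalize mv * PySem.Int.powMod 2 tws (10 ^ 9 + 7) = a
  generalize ((r0 :: R).sum : Int) = Ssum
  omega
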